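-- pv_equiv track=rewrite | github.com/EliJaghab/tunemeld | migration/aggregator.py | aggregate_tracks_by_isrc
-- ===== SOURCE A (Python) =====
-- import collections
--
-- def aggregate_tracks_by_isrc(services):
--     track_aggregate = collections.defaultdict(dict)
--
--     for service in services:
--         for track in service:
--             isrc = track['isrc']
--             service = track["source"]
--             track_aggregate[isrc][service] = track
--
--     filtered_aggregate = {}
--     for isrc, sources in track_aggregate.items():
--         if len(sources) > 1:
--             filtered_aggregate[isrc] = sources
--
--     return filtered_aggregate
-- ===== SOURCE B (Python) =====
-- def aggregate_tracks_by_isrc(services):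
--     flat = [track for service in services for track in service]
--     result = {}
--     for isrc in dict.fromkeys(track['isrc'] for track in flat):
--         sources = {}
--         for track in flat:
--             if track['isrc'] == isrc:
--                 sources[track['source']] = track
--         if len(sources) > 1:
--             result[isrc] = sources
--     return result
-- ===== Notes on version B (the rewrite author's own statement) =====
-- stated objective: alternative
-- what changed: Replaces A's single-pass nested defaultdict aggregation with flatten + ordered-distinct isrc listing (dict.fromkeys) and a per-isrc rescan that rebuilds each source group independently.
import Mathlib
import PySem

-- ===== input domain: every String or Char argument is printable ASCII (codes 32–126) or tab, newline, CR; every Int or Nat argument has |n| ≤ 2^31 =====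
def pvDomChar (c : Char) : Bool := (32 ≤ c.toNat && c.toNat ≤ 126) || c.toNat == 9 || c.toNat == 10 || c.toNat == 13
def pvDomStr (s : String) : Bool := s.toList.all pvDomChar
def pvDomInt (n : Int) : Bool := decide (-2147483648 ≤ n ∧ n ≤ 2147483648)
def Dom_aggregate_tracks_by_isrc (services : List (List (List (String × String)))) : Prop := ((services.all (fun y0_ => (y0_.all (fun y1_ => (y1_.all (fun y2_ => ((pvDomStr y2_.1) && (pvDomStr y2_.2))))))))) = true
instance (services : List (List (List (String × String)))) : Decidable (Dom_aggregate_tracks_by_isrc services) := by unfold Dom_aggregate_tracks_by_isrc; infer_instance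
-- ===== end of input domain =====

-- B re-implements the aggregation as flatten + per-distinct-isrc rescan instead of A's
-- single-pass nested defaultdict (objective: alternative; not faster).

-- shared key-lookup helpers: track['isrc'] / track['source'] (first match; total form,
-- used by both ports — Pre_ guarantees the key is present, where Python would raise KeyError)
def pvIsrc (t : List (String × String)) : String := (List.lookup "isrc" t).getD ""
def pvSource (t : List (String × String)) : String := (List.lookup "source" t).getD ""

-- ===== PORT A =====
-- A: one pass over services/tracks into defaultdict(dict), then keep entries with > 1 source
def aggregate_tracks_by_isrc (services : List (List (List (String × String)))) : List (String × List (String × List (String × String))) :=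
  let track_aggregate : PySem.Dict String (PySem.Dict String (List (String × String))) :=
    services.foldl (fun d service =>
      service.foldl (fun d track =>
        d.modify (pvIsrc track) PySem.Dict.empty (fun inner => inner.insert (pvSource track) track)) d)
      PySem.Dict.empty
  let filtered : PySem.Dict String (PySem.Dict String (List (String × String))) :=
    track_aggregate.items.foldl (fun fd p => if p.2.size > 1 then fd.insert p.1 p.2 else fd)
      PySem.Dict.empty
  filtered.items.map (fun p => (p.1, p.2.items))

-- ===== PORT B =====
-- B: flatten, list the distinct isrcs in first-seen order, rebuild each group by rescanning
def aggregate_tracks_by_isrc_alt (services : List (List (List (String × String)))) : List (String × List (String × List (String × String))) :=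
  let flat := services.flatten
  let isrcs := PySem.List.dedup (flat.map pvIsrc)
  let result : PySem.Dict String (PySem.Dict String (List (String × String))) :=
    isrcs.foldl (fun rd isrc =>
      let sources : PySem.Dict String (List (String × String)) :=
        flat.foldl (fun sd track =>
          if pvIsrc track == isrc then sd.insert (pvSource track) track else sd)
          PySem.Dict.empty
      if sources.size > 1 then rd.insert isrc sources else rd)
      PySem.Dict.empty
  result.items.map (fun p => (p.1, p.2.items))

-- ===== PRECONDITION & SPEC =====
-- Pre_: every track carries the keys "isrc" and "source" — on a track missing either, Python A raises KeyError
def Pre_aggregate_tracks_by_isrc (services : List (List (List (String × String)))) : Prop :=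
  (services.all (fun svc => svc.all (fun t =>
    (List.lookup "isrc" t).isSome && (List.lookup "source" t).isSome))) = true
instance (services : List (List (List (String × String)))) : Decidable (Pre_aggregate_tracks_by_isrc services) := by unfold Pre_aggregate_tracks_by_isrc; infer_instance

def pvWitness_aggregate_tracks_by_isrc : (List (List (List (String × String)))) :=
  [[[("isrc", "A1"), ("source", "s1")]], [[("isrc", "A1"), ("source", "s2")]]]

def Spec_aggregate_tracks_by_isrc (services : List (List (List (String × String)))) (out : List (String × List (String × List (String × String)))) : Prop := out = aggregate_tracks_by_isrc_alt services
instance (services : List (List (List (String × String)))) (out : List (String × List (String × List (String × String)))) : Decidable (Spec_aggregate_tracks_by_isrc services out) := by unfold Spec_aggregate_tracks_by_isrc; infer_instance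

-- ===== CLAIM (what is proved, stated in full; the proofs are below) =====
def Claim_equal_aggregate_tracks_by_isrc : Prop := ∀ (services : List (List (List (String × String)))), Dom_aggregate_tracks_by_isrc services → Pre_aggregate_tracks_by_isrc services → Spec_aggregate_tracks_by_isrc services (aggregate_tracks_by_isrc services)

-- ===== LEMMAS AND PROOFS =====

-- the group built for one isrc is the fold of the matching tracks, for any start dict
lemma getD_foldl_step (c : String) :
    ∀ (l : List (List (String × String))) (d : PySem.Dict String (PySem.Dict String (List (String × String)))),
      (l.foldl (fun d track =>
          d.modify (pvIsrc track) PySem.Dict.empty (fun inner => inner.insert (pvSource track) track)) d).getD c PySem.Dict.empty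
        = (l.filter (fun t => pvIsrc t == c)).foldl
            (fun sd t => sd.insert (pvSource t) t) (d.getD c PySem.Dict.empty) := by
  intro l
  induction l with
  | nil => intro d; simp
  | cons t l ih =>
    intro d
    simp only [List.foldl_cons, List.filter_cons, ih, PySem.Dict.getD_modify]
    by_cases h : pvIsrc t = c
    · simp [h]
    · simp [h, Ne.symm h]

-- folding conditional inserts over fresh distinct keys appends exactly the kept pairs
lemma items_foldl_insert_filter {α : Type} {ν : Type} (key : α → String) (val : α → ν)
    (p : α → Prop) [DecidablePred p] :
    ∀ (l : List α) (d : PySem.Dict String ν),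
      (l.map key).Nodup → (∀ a ∈ l, d.contains (key a) = false) →
      (l.foldl (fun fd a => if p a then fd.insert (key a) (val a) else fd) d).items
        = d.items ++ (l.filter (fun a => decide (p a))).map (fun a => (key a, val a)) := by
  intro l
  induction l with
  | nil => intro d _ _; simp
  | cons a l ih =>
    intro d hnd hfresh
    simp only [List.map_cons, List.nodup_cons] at hnd
    have hfresh' : ∀ b ∈ l, ¬ key b = key a := fun b hb h => hnd.1 (h ▸ List.mem_map_of_mem hb)
    simp only [List.foldl_cons, List.filter_cons]
    by_cases hp : p a
    · rw [if_pos hp, ih _ hnd.2 ?fresh,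
        PySem.Dict.items_insert_of_not_contains _ _ (hfresh a List.mem_cons_self)]
      · simp [hp]
      case fresh =>
        intro b hb
        rw [PySem.Dict.contains_insert]
        simp [hfresh' b hb, hfresh b (List.mem_cons_of_mem _ hb)]
    · rw [if_neg hp, ih _ hnd.2 (fun b hb => hfresh b (List.mem_cons_of_mem _ hb))]
      simp [hp]

-- ===== VERDICT (by name: the statement is the Claim_ definition above) =====
theorem aggregate_tracks_by_isrc_spec : Claim_equal_aggregate_tracks_by_isrc := by
  intro services _ _
  unfold Spec_aggregate_tracks_by_isrc aggregate_tracks_by_isrc aggregate_tracks_by_isrc_alt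
  simp only []
  rw [← List.foldl_flatten]
  set flat := services.flatten with hflat
  set agg := flat.foldl (fun d track =>
      d.modify (pvIsrc track) PySem.Dict.empty (fun inner => inner.insert (pvSource track) track))
    PySem.Dict.empty with hagg
  have hnd : agg.keys.Nodup := by
    rw [hagg]
    exact PySem.Dict.nodup_keys_foldl_modify_key flat pvIsrc PySem.Dict.empty
      (fun _ track inner => inner.insert (pvSource track) track) PySem.Dict.empty
      PySem.Dict.nodup_keys_empty
  have hkeys : agg.keys = PySem.List.dedup (flat.map pvIsrc) := by
    rw [hagg]
    have := PySem.Dict.keys_foldl_modify_key flat pvIsrc PySem.Dict.empty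
      (fun _ track inner => inner.insert (pvSource track) track) PySem.Dict.empty
    simpa [PySem.Set.update, ← PySem.Set.ofList_eq_foldl] using this
  -- the group B rebuilds for isrc c is exactly agg's entry at c
  have hsrc : ∀ c : String,
      (flat.foldl (fun sd track => if pvIsrc track == c then sd.insert (pvSource track) track else sd)
        PySem.Dict.empty) = agg.getD c PySem.Dict.empty := by
    intro c
    rw [hagg, getD_foldl_step c flat PySem.Dict.empty, ← List.foldl_filter]
    simp
  simp only [hsrc]
  rw [PySem.Dict.items_eq_map_keys agg hnd PySem.Dict.empty, hkeys]
  set isrcs := PySem.List.dedup (flat.map pvIsrc) with hisrcs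
  have hndk : isrcs.Nodup := PySem.List.nodup_dedup _
  have hA := items_foldl_insert_filter (fun p : String × PySem.Dict String (List (String × String)) => p.1)
      (fun p => p.2) (fun p => p.2.size > 1)
      (isrcs.map (fun k => (k, agg.getD k PySem.Dict.empty))) PySem.Dict.empty
      (by simpa [List.map_map, Function.comp_def] using hndk) (by intro a _; simp)
  have hB := items_foldl_insert_filter (fun c : String => c)
      (fun c => agg.getD c PySem.Dict.empty) (fun c => (agg.getD c PySem.Dict.empty).size > 1)
      isrcs PySem.Dict.empty (by simpa using hndk) (by intro a _; simp)
  simp only [] at hA hB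
  rw [hA, hB]
  simp [List.filter_map, List.map_map, Function.comp_def]
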